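-- pv_equiv track=rewrite | github.com/strawstack/AdventOfCode2022 | day/24/p2.py | eq_d
-- ===== SOURCE A (Python) =====
-- def eq_d(a, b):
--     for k in a:
--         if k not in b:
--             return False
--     for k in b:
--         if k not in a:
--             return False
--     return True
-- ===== SOURCE B (Python) =====
-- def eq_d(a, b):
--     if len(a) != len(b):
--         return False
--     bkeys = set(b)
--     for k in a:
--         if k not in bkeys:
--             return False
--     return True
-- ===== Notes on version B (the rewrite author's own statement) =====
-- stated objective: alternative
-- what changed: Replaces A's two symmetric membership scans by a length check plus a single one-directional pass over a's keys against a set of b's keys, relying on key uniqueness for two-way containment.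
import Mathlib
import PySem

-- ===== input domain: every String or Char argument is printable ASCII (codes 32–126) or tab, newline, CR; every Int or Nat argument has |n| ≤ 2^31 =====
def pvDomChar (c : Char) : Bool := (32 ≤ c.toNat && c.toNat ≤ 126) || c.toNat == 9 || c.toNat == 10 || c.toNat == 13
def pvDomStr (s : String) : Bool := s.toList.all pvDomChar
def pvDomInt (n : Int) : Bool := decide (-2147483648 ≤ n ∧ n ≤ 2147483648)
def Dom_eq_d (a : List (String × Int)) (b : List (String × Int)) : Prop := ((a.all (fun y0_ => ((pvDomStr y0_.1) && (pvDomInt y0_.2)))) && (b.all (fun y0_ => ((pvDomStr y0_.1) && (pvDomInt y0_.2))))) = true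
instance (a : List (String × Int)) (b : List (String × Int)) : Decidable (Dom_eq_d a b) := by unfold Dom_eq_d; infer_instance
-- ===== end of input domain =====

-- B replaces A's two symmetric membership loops by a length check plus one one-directional pass over a set of b's keys (objective: alternative).

-- ===== PORT A =====
-- 'k in d' for a dict d: some pair of the association list has key k (exact for Python dict membership)
def keyIn (d : List (String × Int)) (k : String) : Bool := d.any (fun p => p.1 == k)

-- first loop: 'for k in a: if k not in b: return False'; then the symmetric loop over b; then True
def eq_d (a : List (String × Int)) (b : List (String × Int)) : Bool :=
  a.all (fun k => keyIn b k.1) && b.all (fun k => keyIn a k.1)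

-- ===== PORT B =====
def eq_d_alt (a : List (String × Int)) (b : List (String × Int)) : Bool :=
  if a.length ≠ b.length then false
  else
    let bkeys : PySem.Set String := PySem.Set.ofList (b.map Prod.fst)
    a.all (fun k => PySem.Set.contains bkeys k.1)

-- ===== PRECONDITION & SPEC =====
-- Pre_ requires distinct keys in each association list: the Python arguments are dicts, whose keys are
-- necessarily distinct, so every input reachable from the Python is admitted.
def Pre_eq_d (a : List (String × Int)) (b : List (String × Int)) : Prop :=
  (a.map Prod.fst).Nodup ∧ (b.map Prod.fst).Nodup
instance (a : List (String × Int)) (b : List (String × Int)) : Decidable (Pre_eq_d a b) := by unfold Pre_eq_d; infer_instance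

def pvWitness_eq_d : (List (String × Int)) × (List (String × Int)) :=
  ([("x", 1), ("y", 2)], [("y", 5), ("x", 0)])

def Spec_eq_d (a : List (String × Int)) (b : List (String × Int)) (out : Bool) : Prop := out = eq_d_alt a b
instance (a : List (String × Int)) (b : List (String × Int)) (out : Bool) : Decidable (Spec_eq_d a b out) := by unfold Spec_eq_d; infer_instance

-- ===== CLAIM (what is proved, stated in full; the proofs are below) =====
def Claim_equal_eq_d : Prop := ∀ (a : List (String × Int)) (b : List (String × Int)), Dom_eq_d a b → Pre_eq_d a b → Spec_eq_d a b (eq_d a b)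

-- ===== LEMMAS AND PROOFS =====

lemma nodup_length_le {ka kb : List String} (ha : ka.Nodup) (h : ∀ k ∈ ka, k ∈ kb) :
    ka.length ≤ kb.length :=
  calc ka.length = ka.toFinset.card := (List.toFinset_card_of_nodup ha).symm
    _ ≤ kb.toFinset.card := Finset.card_le_card (fun x hx => List.mem_toFinset.mpr (h x (List.mem_toFinset.mp hx)))
    _ ≤ kb.length := kb.toFinset_card_le

-- key-set lemma: with distinct keys, mutual containment ↔ equal length plus one-way containment
lemma keyset_iff {ka kb : List String} (ha : ka.Nodup) (hb : kb.Nodup) :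
    ((∀ k ∈ ka, k ∈ kb) ∧ (∀ k ∈ kb, k ∈ ka)) ↔ (ka.length = kb.length ∧ ∀ k ∈ ka, k ∈ kb) := by
  constructor
  · rintro ⟨h1, h2⟩
    exact ⟨le_antisymm (nodup_length_le ha h1) (nodup_length_le hb h2), h1⟩
  · rintro ⟨hlen, h1⟩
    refine ⟨h1, ?_⟩
    have hsub : ka.toFinset ⊆ kb.toFinset := fun x hx =>
      List.mem_toFinset.mpr (h1 x (List.mem_toFinset.mp hx))
    have hcard : kb.toFinset.card ≤ ka.toFinset.card := by
      rw [List.toFinset_card_of_nodup ha, List.toFinset_card_of_nodup hb, hlen]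
    have heq := Finset.eq_of_subset_of_card_le hsub hcard
    intro k hk
    exact List.mem_toFinset.mp (heq ▸ List.mem_toFinset.mpr hk)

lemma keyIn_iff (d : List (String × Int)) (k : String) :
    keyIn d k = true ↔ k ∈ d.map Prod.fst := by
  simp only [keyIn, List.any_eq_true, beq_iff_eq, List.mem_map]

-- ===== VERDICT (by name: the statement is the Claim_ definition above) =====
theorem eq_d_spec : Claim_equal_eq_d := by
  intro a b _ hpre
  unfold Spec_eq_d eq_d eq_d_alt
  rcases hpre with ⟨ha, hb⟩
  rw [Bool.eq_iff_iff]
  by_cases hlen : a.length = b.length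
  · simp only [hlen, ne_eq, not_true_eq_false, if_false, Bool.and_eq_true, List.all_eq_true,
      keyIn_iff, PySem.Set.contains_iff, PySem.Set.mem_ofList]
    have hlen' : (a.map Prod.fst).length = (b.map Prod.fst).length := by
      simpa using hlen
    constructor
    · exact fun h => h.1
    · intro h
      have hmut := (keyset_iff ha hb).mpr ⟨hlen', fun k hk => by
        rcases List.mem_map.mp hk with ⟨p, hp, rfl⟩; exact h p hp⟩
      exact ⟨fun p hp => h p hp, fun p hp => hmut.2 p.1 (List.mem_map.mpr ⟨p, hp, rfl⟩)⟩
  · simp only [ne_eq, hlen, not_false_eq_true, if_true, Bool.and_eq_true, List.all_eq_true,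
      keyIn_iff, Bool.false_eq_true, iff_false, not_and]
    intro h1 h2
    apply hlen
    have := (keyset_iff ha hb).mp ⟨fun k hk => by
      rcases List.mem_map.mp hk with ⟨p, hp, rfl⟩; exact h1 p hp,
      fun k hk => by rcases List.mem_map.mp hk with ⟨p, hp, rfl⟩; exact h2 p hp⟩
    simpa using this.1
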